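-- pv_equiv track=rewrite | github.com/Nikitharaj/conversationai-assignment | src/rag_system/simple_answer_generator.py | filter_query
-- ===== SOURCE A (Python) =====
-- from typing import List, Dict, Union, Optional, Any, Tuple
--
-- def filter_query(query: str) -> Tuple[str, bool]:
--     """
--     Apply input-side guardrails to filter irrelevant or unsafe queries.
--
--     Args:
--         query: User query
--
--     Returns:
--         Tuple of (possibly modified query, is_filtered)
--     """
--     # Check if the query is related to financial information
--     financial_keywords = [
--         "revenue",
--         "profit",
--         "income",
--         "earnings",
--         "sales",
--         "margin",
--         "assets",
--         "liabilities",
--         "equity",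
--         "cash flow",
--         "balance sheet",
--         "financial",
--         "fiscal",
--         "quarter",
--         "annual",
--         "year",
--         "dividend",
--         "stock",
--         "share",
--         "market",
--         "growth",
--         "decline",
--         "increase",
--         "decrease",
--     ]
--
--     # Check if any financial keyword is in the query
--     is_financial = any(
--         keyword.lower() in query.lower() for keyword in financial_keywords
--     )
--
--     if not is_financial:
--         return (
--             "I can only answer questions related to financial information in the provided documents.",
--             True,
--         )
--
--     return query, False
-- ===== SOURCE B (Python) =====
-- from typing import Tuple
--
-- _FINANCIAL_KEYWORDS = [
--     "revenue", "profit", "income", "earnings", "sales", "margin",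
--     "assets", "liabilities", "equity", "cash flow", "balance sheet",
--     "financial", "fiscal", "quarter", "annual", "year", "dividend",
--     "stock", "share", "market", "growth", "decline", "increase", "decrease",
-- ]
--
-- _BLOCK_MESSAGE = (
--     "I can only answer questions related to financial information in the provided documents."
-- )
--
--
-- def _build_trie(words):
--     """Prefix trie as nested dicts; the key '' marks the end of a keyword."""
--     root = {}
--     for w in words:
--         node = root
--         for ch in w:
--             node = node.setdefault(ch, {})
--         node[""] = True
--     return root
--
--
-- _TRIE = _build_trie(_FINANCIAL_KEYWORDS)
--
--
-- def filter_query(query: str) -> Tuple[str, bool]: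
--     """Multi-pattern trie matching: from each position of the lowered query,
--     walk the keyword trie; hitting an end marker means a financial keyword occurs."""
--     q = query.lower()
--     n = len(q)
--     for i in range(n + 1):
--         node = _TRIE
--         j = i
--         while True:
--             if "" in node:
--                 return query, False
--             if j < n and q[j] in node:
--                 node = node[q[j]]
--                 j += 1
--             else:
--                 break
--     return _BLOCK_MESSAGE, True
-- ===== Notes on version B (the rewrite author's own statement) =====
-- stated objective: alternative
-- what changed: Builds a prefix trie (nested dicts with an end-marker key) of the 24 financial keywords once, then detects a keyword by walking the trie from each position of the lowered query, instead of running 24 independent substring searches over the query.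
import Mathlib
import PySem

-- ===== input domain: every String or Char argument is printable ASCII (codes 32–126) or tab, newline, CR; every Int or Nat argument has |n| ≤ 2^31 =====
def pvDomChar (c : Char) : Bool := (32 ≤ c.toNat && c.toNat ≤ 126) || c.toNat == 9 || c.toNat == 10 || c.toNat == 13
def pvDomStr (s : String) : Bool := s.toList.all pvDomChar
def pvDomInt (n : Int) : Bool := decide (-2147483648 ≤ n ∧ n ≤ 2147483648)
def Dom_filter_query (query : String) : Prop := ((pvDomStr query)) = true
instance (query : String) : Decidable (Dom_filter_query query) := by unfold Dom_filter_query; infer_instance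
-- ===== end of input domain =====

-- B builds a prefix trie of the keywords and detects a keyword by walking the trie from each
-- position of the lowered query, replacing A's 24 independent substring searches (alternative
-- data structure, same observable behaviour).

-- ===== PORT A =====
def financialKeywords : List String :=
  ["revenue", "profit", "income", "earnings", "sales", "margin",
   "assets", "liabilities", "equity", "cash flow", "balance sheet",
   "financial", "fiscal", "quarter", "annual", "year", "dividend",
   "stock", "share", "market", "growth", "decline", "increase", "decrease"]

def filter_query (query : String) : String × Bool :=
  let is_financial :=
    financialKeywords.any (fun keyword =>
      PySem.Str.isIn (PySem.Str.lower keyword) (PySem.Str.lower query))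
  if !is_financial then
    ("I can only answer questions related to financial information in the provided documents.",
     true)
  else
    (query, false)

-- ===== PORT B =====
def pvKeywordChars : List (List Char) :=
  ["revenue".toList, "profit".toList, "income".toList, "earnings".toList, "sales".toList,
   "margin".toList, "assets".toList, "liabilities".toList, "equity".toList,
   "cash flow".toList, "balance sheet".toList, "financial".toList, "fiscal".toList,
   "quarter".toList, "annual".toList, "year".toList, "dividend".toList, "stock".toList,
   "share".toList, "market".toList, "growth".toList, "decline".toList, "increase".toList,
   "decrease".toList]

-- Source B's nested-dict trie: 'empty' is an absent child, 'node accept children' a dict whose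
-- end-marker key "" is the Bool and whose character keys are the children function.
inductive Trie where
  | empty : Trie
  | node : Bool → (Char → Trie) → Trie

-- inner 'for ch in w: node = node.setdefault(ch, {})' + 'node[""] = True'
def Trie.insert : Trie → List Char → Trie
  | .empty, [] => .node true (fun _ => .empty)
  | .empty, c :: r => .node false (fun d => if d = c then Trie.insert .empty r else .empty)
  | .node _ ch, [] => .node true ch
  | .node b ch, c :: r => .node b (fun d => if d = c then Trie.insert (ch c) r else ch d)

-- '_build_trie': fold the insertion over the keyword list, starting from the empty dict
def buildTrie (ws : List (List Char)) : Trie := ws.foldl Trie.insert .empty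

-- Source B's inner while loop: at each node check the end marker, else descend on the next char
def matchWalk : Trie → List Char → Bool
  | .empty, _ => false
  | .node b _, [] => b
  | .node b ch, c :: r => b || matchWalk (ch c) r

-- Source B's outer 'for i in range(n+1)': try a walk from every position (suffix) of q
def trieScan (t : Trie) : List Char → Bool
  | [] => matchWalk t []
  | c :: r => matchWalk t (c :: r) || trieScan t r

def filter_query_alt (query : String) : String × Bool :=
  let q := (PySem.Str.lower query).toList
  if trieScan (buildTrie pvKeywordChars) q then
    (query, false)
  else
    ("I can only answer questions related to financial information in the provided documents.",
     true)

-- ===== PRECONDITION & SPEC =====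
def Spec_filter_query (query : String) (out : String × Bool) : Prop := out = filter_query_alt query
instance (query : String) (out : String × Bool) : Decidable (Spec_filter_query query out) := by unfold Spec_filter_query; infer_instance

-- ===== CLAIM (what is proved, stated in full; the proofs are below) =====
def Claim_equal_filter_query : Prop := ∀ (query : String), Dom_filter_query query → Spec_filter_query query (filter_query query)

-- ===== LEMMAS AND PROOFS =====

-- words stored in a trie
def Trie.contains : Trie → List Char → Bool
  | .empty, _ => false
  | .node b _, [] => b
  | .node _ ch, c :: r => Trie.contains (ch c) r

lemma contains_insert (w' : List Char) : ∀ (t : Trie) (w : List Char),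
    Trie.contains (Trie.insert t w') w = true ↔ w = w' ∨ Trie.contains t w = true := by
  induction w' with
  | nil =>
      intro t w
      cases t <;> cases w <;> simp [Trie.insert, Trie.contains]
  | cons c r ih =>
      intro t w
      cases t with
      | empty =>
          cases w with
          | nil => simp [Trie.insert, Trie.contains]
          | cons d w' =>
              by_cases hd : d = c <;>
                simp [Trie.insert, Trie.contains, hd, ih]
      | node b ch =>
          cases w with
          | nil => simp [Trie.insert, Trie.contains]
          | cons d w' =>
              by_cases hd : d = c <;>
                simp [Trie.insert, Trie.contains, hd, ih]

lemma contains_build_aux (ws : List (List Char)) : ∀ (t : Trie) (w : List Char),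
    Trie.contains (ws.foldl Trie.insert t) w = true ↔ w ∈ ws ∨ Trie.contains t w = true := by
  induction ws with
  | nil => simp
  | cons x xs ih =>
      intro t w
      simp [List.foldl_cons, ih, contains_insert]
      tauto

lemma contains_build (ws : List (List Char)) (w : List Char) :
    Trie.contains (buildTrie ws) w = true ↔ w ∈ ws := by
  simp [buildTrie, contains_build_aux, Trie.contains]

lemma matchWalk_iff : ∀ (s : List Char) (t : Trie),
    matchWalk t s = true ↔ ∃ w, Trie.contains t w = true ∧ w <+: s := by
  intro s
  induction s with
  | nil =>
      intro t
      cases t <;> simp [matchWalk, Trie.contains, List.prefix_nil]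
  | cons c r ih =>
      intro t
      cases t with
      | empty => simp [matchWalk, Trie.contains]
      | node b ch =>
          simp only [matchWalk, Bool.or_eq_true, ih]
          constructor
          · rintro (hb | ⟨w, hw, hp⟩)
            · exact ⟨[], by simpa [Trie.contains] using hb, List.nil_prefix⟩
            · exact ⟨c :: w, by simpa [Trie.contains] using hw, by simpa using hp⟩
          · rintro ⟨w, hw, hp⟩
            cases w with
            | nil => left; simpa [Trie.contains] using hw
            | cons d w' =>
                rcases List.cons_prefix_cons.mp hp with ⟨rfl, hp'⟩
                right; exact ⟨w', by simpa [Trie.contains] using hw, hp'⟩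

lemma trieScan_iff (t : Trie) : ∀ (s : List Char),
    trieScan t s = true ↔ ∃ w, Trie.contains t w = true ∧ w <:+: s := by
  intro s
  induction s with
  | nil => simp [trieScan, matchWalk_iff]
  | cons c r ih =>
      simp only [trieScan, Bool.or_eq_true, matchWalk_iff, ih]
      constructor
      · rintro (⟨w, hw, hp⟩ | ⟨w, hw, hi⟩)
        · exact ⟨w, hw, hp.isInfix⟩
        · exact ⟨w, hw, hi.trans (List.suffix_cons c r).isInfix⟩
      · rintro ⟨w, hw, hi⟩
        rcases List.infix_cons_iff.mp hi with h | h
        · exact Or.inl ⟨w, hw, h⟩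
        · exact Or.inr ⟨w, hw, h⟩

-- lowering A's (already lowercase) keyword literals is the identity, listwise
lemma pvKeywords_lower :
    financialKeywords.map (fun kw => (PySem.Str.lower kw).toList) = pvKeywordChars := by
  decide

lemma pvCond_eq (query : String) :
    financialKeywords.any (fun keyword =>
        PySem.Str.isIn (PySem.Str.lower keyword) (PySem.Str.lower query))
      = trieScan (buildTrie pvKeywordChars) (PySem.Str.lower query).toList := by
  rw [Bool.eq_iff_iff, trieScan_iff, List.any_eq_true]
  constructor
  · rintro ⟨kw, hkw, h⟩
    refine ⟨(PySem.Str.lower kw).toList, ?_, ?_⟩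
    · rw [contains_build, ← pvKeywords_lower]; exact List.mem_map_of_mem hkw
    · exact (PySem.Chars.isIn_iff_infix _ _).mp h
  · rintro ⟨w, hw, hi⟩
    rw [contains_build, ← pvKeywords_lower] at hw
    rcases List.mem_map.mp hw with ⟨kw, hkw, rfl⟩
    exact ⟨kw, hkw, (PySem.Chars.isIn_iff_infix _ _).mpr hi⟩

theorem pv_filter_query_eq (query : String) : filter_query query = filter_query_alt query := by
  unfold filter_query filter_query_alt
  rw [pvCond_eq query]
  rw [PySem.Str.toList_lower] at *
  cases h : trieScan (buildTrie pvKeywordChars) (PySem.Chars.lower query.toList) <;> simp [h]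

-- ===== VERDICT (by name: the statement is the Claim_ definition above) =====
theorem filter_query_spec : Claim_equal_filter_query := by
  intro query _
  unfold Spec_filter_query
  exact pv_filter_query_eq query
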